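-- pv_equiv track=rewrite | github.com/Suhruth9/Spoken_to_Written | spoken2written/processing_text.py | currency_signs
-- ===== SOURCE A (Python) =====
-- d = {"dollars": "$", "dollar": "$"}
--
-- def rem_elems(text_list, r):
--     for i in range(len(r)):
--         text_list.pop(r[i] - i)
--
--     return (text_list)
--
-- def currency_signs(text_list):
--     r = []
--     for i in range(len(text_list)-1):
--         p = text_list[i]
--         if is_int(p):
--             k = d.get(text_list[i+1], None)
--             if k != None:
--                 text_list[i] = k + p
--                 r.append(i+1)
--
--     text_list = rem_elems(text_list, r)
--
--     return(text_list)
--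
-- def is_int(x):
--     try:
--         int(x)
--         return True
--     except ValueError:
--         return False
-- ===== SOURCE B (Python) =====
-- # B: one lookbehind pass building a fresh list: a currency word is merged into the
-- # previous output token when that token is int-like; int() is only tried next to a
-- # currency word. A mutates its argument in place and returns it; B leaves it untouched
-- # (the stated equivalence is about the return value).
-- d = {"dollars": "$", "dollar": "$"}
--
-- def is_int(x):
--     try:
--         int(x)
--         return True
--     except ValueError:
--         return False
--
-- def currency_signs(text_list):
--     out = []
--     append = out.append
--     get = d.get
--     for x in text_list:
--         k = get(x)
--         if k is not None and out and is_int(out[-1]):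
--             out[-1] = k + out[-1]
--         else:
--             append(x)
--     return out
-- ===== Notes on version B (the rewrite author's own statement) =====
-- stated objective: faster
-- what changed: B replaces A's two-phase algorithm (index loop mutating the list in place, then popping each recorded currency-word position) with a single lookbehind pass that appends to a fresh list and merges a currency word into the previous output token, so int() is only attempted next to a currency word instead of on every element and no quadratic pop phase remains.
import Mathlib
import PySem

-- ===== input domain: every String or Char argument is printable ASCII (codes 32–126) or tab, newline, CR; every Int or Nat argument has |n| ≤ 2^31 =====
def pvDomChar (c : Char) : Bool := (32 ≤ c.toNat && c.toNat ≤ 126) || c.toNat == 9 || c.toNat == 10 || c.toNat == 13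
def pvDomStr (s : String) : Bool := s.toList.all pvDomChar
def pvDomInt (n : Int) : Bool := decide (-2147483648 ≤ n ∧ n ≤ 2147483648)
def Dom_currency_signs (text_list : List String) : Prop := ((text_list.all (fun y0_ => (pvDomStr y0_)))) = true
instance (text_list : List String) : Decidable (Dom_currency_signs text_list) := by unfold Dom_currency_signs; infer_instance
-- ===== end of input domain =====

-- B replaces A's mutate-then-pop two-phase loop with one lookbehind pass building a fresh
-- list (objective: faster, as measured); the theorems are about the RETURN value only —
-- Python A additionally mutates its argument in place, B leaves it untouched.

-- ===== PORT A =====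
-- module constant d = {"dollars": "$", "dollar": "$"}
def dA : PySem.Dict String String := PySem.Dict.ofList [("dollars", "$"), ("dollar", "$")]

-- is_int(x): int(x) on a str raises only ValueError, which is caught
def is_int (x : String) : Bool := (PySem.Int.ofStr? x).isSome

-- body of A's first loop, one iteration for index i
def stepA (st : List String × List Int) (i : Int) : List String × List Int :=
  let p := PySem.List.pyGetD st.1 i ""          -- text_list[i]; i is always in range here
  if is_int p then
    match PySem.Dict.get? dA (PySem.List.pyGetD st.1 (i + 1) "") with
    | some k => (PySem.List.pySetD st.1 i (k ++ p), st.2 ++ [i + 1])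
    | none => st
  else st

-- rem_elems: for i in range(len(r)): text_list.pop(r[i] - i)
def rem_elems (text_list : List String) (r : List Int) : List String :=
  (PySem.List.enumerate r).foldl
    (fun tl p =>
      match PySem.List.pop? tl (p.2 - p.1) with
      | some q => q.2
      | none => tl)   -- the pop index is always in range for the r that A builds (Python never raises here)
    text_list

def currency_signs (text_list : List String) : List String :=
  let st := (PySem.List.pyRange 0 ((text_list.length : Int) - 1) 1).foldl stepA (text_list, [])
  rem_elems st.1 st.2

-- ===== PORT B =====
def dB : PySem.Dict String String := PySem.Dict.ofList [("dollars", "$"), ("dollar", "$")]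

def is_int_b (x : String) : Bool := (PySem.Int.ofStr? x).isSome

-- body of Source B's for loop: merge the currency word into out[-1] or append
def stepB (out : List String) (x : String) : List String :=
  match PySem.Dict.get? dB x with
  | some k =>
    if out ≠ [] ∧ is_int_b (PySem.List.pyGetD out (-1) "") then
      PySem.List.pySetD out (-1) (k ++ PySem.List.pyGetD out (-1) "")   -- out[-1] = k + out[-1]
    else out ++ [x]
  | none => out ++ [x]

def currency_signs_alt (text_list : List String) : List String :=
  text_list.foldl stepB []

-- ===== PRECONDITION & SPEC =====
def Spec_currency_signs (text_list : List String) (out : List String) : Prop := out = currency_signs_alt text_list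
instance (text_list : List String) (out : List String) : Decidable (Spec_currency_signs text_list out) := by unfold Spec_currency_signs; infer_instance

-- ===== CLAIM (what is proved, stated in full; the proofs are below) =====
def Claim_equal_currency_signs : Prop := ∀ (text_list : List String), Dom_currency_signs text_list → Spec_currency_signs text_list (currency_signs text_list)

-- ===== LEMMAS AND PROOFS =====

-- the merged sequence expressed as a two-at-a-time recursion (proof-side middleman)
def alt2 : List String → List String
  | [] => []
  | [x] => [x]
  | x :: y :: rest =>
    if is_int x then
      match PySem.Dict.get? dA y with
      | some k => (k ++ x) :: alt2 rest
      | none => x :: alt2 (y :: rest)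
    else x :: alt2 (y :: rest)

-- value of A's first phase: the element list after the in-place merges (map with lookahead)
def mrg : List String → List String
  | [] => []
  | [x] => [x]
  | x :: y :: rest =>
    (match (if is_int x then PySem.Dict.get? dA y else none) with
     | some k => k ++ x
     | none => x) :: mrg (y :: rest)

-- the indices A records in r, with o the absolute position of the sublist's head
def mi : List String → Int → List Int
  | [], _ => []
  | [_], _ => []
  | x :: y :: rest, o =>
    (match (if is_int x then PySem.Dict.get? dA y else none) with
     | some _ => [o + 1]
     | none => []) ++ mi (y :: rest) (o + 1)

lemma dA_mk : dA = PySem.Dict.mk [("dollars", "$"), ("dollar", "$")] := by decide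

-- a currency word is not int-like, so merges never overlap
lemma key_not_int {y k : String} (h : PySem.Dict.get? dA y = some k) : is_int y = false := by
  rw [dA_mk] at h
  simp only [PySem.Dict.get?_mk_cons] at h
  split_ifs at h with h1 h2
  · have : "dollars" = y := by simpa using h1
    subst this; decide
  · have : "dollar" = y := by simpa using h2
    subst this; decide
  · simp [PySem.Dict.get?] at h

lemma mrg_cons_key {y k : String} (h : PySem.Dict.get? dA y = some k) (rest : List String) :
    mrg (y :: rest) = y :: mrg rest := by
  cases rest with
  | nil => simp [mrg]
  | cons z t => simp [mrg, key_not_int h]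

lemma mi_cons_key {y k : String} (h : PySem.Dict.get? dA y = some k) (rest : List String) (o : Int) :
    mi (y :: rest) o = mi rest (o + 1) := by
  cases rest with
  | nil => simp [mi]
  | cons z t => simp [mi, key_not_int h]

lemma pyGetD_app (a : List String) (x : String) (l : List String) (d : String) :
    PySem.List.pyGetD (a ++ x :: l) (a.length : Int) d = x := by
  rw [PySem.List.pyGetD_natCast]
  simp [List.getD]

lemma pyGetD_app1 (a : List String) (x y : String) (l : List String) (d : String) :
    PySem.List.pyGetD (a ++ x :: y :: l) ((a.length : Int) + 1) d = y := by
  have : ((a.length : Int) + 1) = ((a.length + 1 : Nat) : Int) := by push_cast; ring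
  rw [this, PySem.List.pyGetD_natCast]
  simp [List.getD]

lemma pySetD_app (a : List String) (x : String) (l : List String) (v : String) :
    PySem.List.pySetD (a ++ x :: l) (a.length : Int) v = a ++ v :: l := by
  rw [PySem.List.pySetD_natCast]
  simp

lemma eraseIdx_app (a : List String) (l : List String) (k : Nat) :
    (a ++ l).eraseIdx (a.length + k) = a ++ l.eraseIdx k := by
  induction a with
  | nil => simp
  | cons z t ih => simpa [List.eraseIdx, Nat.succ_add] using ih

-- phase 1: the index loop only ever touches the unprocessed suffix t sitting after prefix a
lemma loopA : ∀ (t a : List String) (r0 : List Int),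
    (PySem.List.pyRange (a.length : Int) ((a.length : Int) + t.length - 1) 1).foldl stepA (a ++ t, r0)
      = (a ++ mrg t, r0 ++ mi t (a.length : Int)) := by
  intro t
  induction t with
  | nil =>
    intro a r0
    rw [PySem.List.pyRange_one_eq_nil (by simp only [List.length_nil]; push_cast; omega)]
    simp [mrg, mi]
  | cons x t ih =>
    intro a r0
    cases t with
    | nil =>
      rw [PySem.List.pyRange_one_eq_nil (by simp only [List.length_cons, List.length_nil]; push_cast; omega)]
      simp [mrg, mi]
    | cons y rest =>
      rw [PySem.List.pyRange_one_cons (by simp only [List.length_cons]; push_cast; omega)]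
      rw [List.foldl_cons]
      have hstep : stepA (a ++ x :: y :: rest, r0) (a.length : Int) =
          if h : is_int x then
            (match PySem.Dict.get? dA y with
             | some k => (a ++ (k ++ x) :: y :: rest, r0 ++ [(a.length : Int) + 1])
             | none => (a ++ x :: y :: rest, r0))
          else (a ++ x :: y :: rest, r0) := by
        simp only [stepA, pyGetD_app, pyGetD_app1, pySetD_app]
        split_ifs with h <;> simp
      rw [hstep]
      by_cases hx : is_int x
      · simp only [hx, dif_pos]
        rcases hk : PySem.Dict.get? dA y with _ | k
        · have := ih (a ++ [x]) r0
          simp only [List.length_append, List.length_cons, List.length_nil] at this ⊢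
          push_cast at this ⊢
          have e1 : (a ++ [x]) ++ y :: rest = a ++ x :: y :: rest := by simp
          rw [e1] at this
          have e2 : (a.length : Int) + 1 + ((rest.length : Int) + 1) - 1
              = (a.length : Int) + ((rest.length : Int) + 1 + 1) - 1 := by ring
          rw [e2] at this
          rw [this]
          simp [mrg, mi, hx, hk]
        · have := ih (a ++ [k ++ x]) (r0 ++ [(a.length : Int) + 1])
          simp only [List.length_append, List.length_cons, List.length_nil] at this ⊢
          push_cast at this ⊢
          have e1 : (a ++ [k ++ x]) ++ y :: rest = a ++ (k ++ x) :: y :: rest := by simp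
          rw [e1] at this
          have e2 : (a.length : Int) + 1 + ((rest.length : Int) + 1) - 1
              = (a.length : Int) + ((rest.length : Int) + 1 + 1) - 1 := by ring
          rw [e2] at this
          rw [this]
          simp [mrg, mi, hx, hk]
      · simp only [hx, dif_neg, Bool.false_eq_true, not_false_iff]
        have := ih (a ++ [x]) r0
        simp only [List.length_append, List.length_cons, List.length_nil] at this ⊢
        push_cast at this ⊢
        have e1 : (a ++ [x]) ++ y :: rest = a ++ x :: y :: rest := by simp
        rw [e1] at this
        have e2 : (a.length : Int) + 1 + ((rest.length : Int) + 1) - 1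
            = (a.length : Int) + ((rest.length : Int) + 1 + 1) - 1 := by ring
        rw [e2] at this
        rw [this]
        simp [mrg, mi, hx]

lemma pop_app (pre : List String) (v y : String) (l : List String) (c : Int) :
    PySem.List.pop? (pre ++ v :: y :: l) (((pre.length : Int) + c + 1) - c) = some (y, pre ++ v :: l) := by
  have e : ((pre.length : Int) + c + 1) - c = ((pre.length + 1 : Nat) : Int) := by push_cast; ring
  rw [e]
  have h := PySem.List.pop?_natCast (pre ++ v :: y :: l) (pre.length + 1) (by simp)
  refine h.trans ?_
  congr 1
  have h1 : (pre ++ v :: y :: l)[pre.length + 1] = y := by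
    rw [List.getElem_append_right (by omega)]
    simp
  have h2 : (pre ++ v :: y :: l).eraseIdx (pre.length + 1) = pre ++ v :: l := by
    have := eraseIdx_app pre (v :: y :: l) 1
    simpa [List.eraseIdx] using this
  rw [h1, h2]

-- phase 2: popping the recorded positions (shifted by the pops already done) yields B's output
lemma remLemma : ∀ (l pre : List String) (c : Int), 0 ≤ c →
    (PySem.List.enumerate (mi l ((pre.length : Int) + c)) c).foldl
      (fun tl p =>
        match PySem.List.pop? tl (p.2 - p.1) with
        | some q => q.2
        | none => tl) (pre ++ mrg l)
      = pre ++ alt2 l := by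
  intro l
  induction l using alt2.induct with
  | case1 => intro pre c hc; simp [mi, mrg, alt2]
  | case2 x => intro pre c hc; simp [mi, mrg, alt2]
  | case3 x y rest hint k hk ih =>
    intro pre c hc
    have hkA : PySem.Dict.get? dA y = some k := hk
    have hintA : is_int x = true := hint
    have hmi : mi (x :: y :: rest) ((pre.length : Int) + c)
        = ((pre.length : Int) + c + 1) :: mi rest ((pre.length : Int) + c + 1 + 1) := by
      rw [show mi (x :: y :: rest) ((pre.length : Int) + c)
            = [(pre.length : Int) + c + 1] ++ mi (y :: rest) ((pre.length : Int) + c + 1) from by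
        simp [mi, hintA, hkA]]
      rw [mi_cons_key hkA]
      rfl
    have hmrg : mrg (x :: y :: rest) = (k ++ x) :: y :: mrg rest := by
      rw [show mrg (x :: y :: rest) = (k ++ x) :: mrg (y :: rest) from by simp [mrg, hintA, hkA]]
      rw [mrg_cons_key hkA]
    rw [hmi, hmrg, PySem.List.enumerate_cons, List.foldl_cons]
    simp only [pop_app pre (k ++ x) y (mrg rest) c]
    have e1 : pre ++ (k ++ x) :: mrg rest = (pre ++ [k ++ x]) ++ mrg rest := by simp
    have e2 : (pre.length : Int) + c + 1 + 1 = (((pre ++ [k ++ x]).length : Int)) + (c + 1) := by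
      simp; ring
    rw [e1, e2, ih (pre ++ [k ++ x]) (c + 1) (by omega)]
    simp [alt2, hint, hk]
  | case4 x y rest hint hk ih =>
    intro pre c hc
    have hkA : PySem.Dict.get? dA y = none := hk
    have hintA : is_int x = true := hint
    have hmi : mi (x :: y :: rest) ((pre.length : Int) + c)
        = mi (y :: rest) ((pre.length : Int) + c + 1) := by simp [mi, hintA, hkA]
    have hmrg : mrg (x :: y :: rest) = x :: mrg (y :: rest) := by simp [mrg, hintA, hkA]
    rw [hmi, hmrg]
    have e1 : pre ++ x :: mrg (y :: rest) = (pre ++ [x]) ++ mrg (y :: rest) := by simp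
    have e2 : (pre.length : Int) + c + 1 = (((pre ++ [x]).length : Int)) + c := by simp; ring
    rw [e1, e2, ih (pre ++ [x]) c hc]
    simp [alt2, hint, hk]
  | case5 x y rest hint ih =>
    intro pre c hc
    have hintA : is_int x = false := by simpa using hint
    have hmi : mi (x :: y :: rest) ((pre.length : Int) + c)
        = mi (y :: rest) ((pre.length : Int) + c + 1) := by simp [mi, hintA]
    have hmrg : mrg (x :: y :: rest) = x :: mrg (y :: rest) := by simp [mrg, hintA]
    rw [hmi, hmrg]
    have e1 : pre ++ x :: mrg (y :: rest) = (pre ++ [x]) ++ mrg (y :: rest) := by simp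
    have e2 : (pre.length : Int) + c + 1 = (((pre ++ [x]).length : Int)) + c := by simp; ring
    rw [e1, e2, ih (pre ++ [x]) c hc]
    simp [alt2, Bool.eq_false_iff.mpr hint]

lemma dropWhile_append_dollar (l : List Char) :
    List.dropWhile PySem.Int.isIntSpace (l ++ ['$']) = List.dropWhile PySem.Int.isIntSpace l ++ ['$'] := by
  induction l with
  | nil => simp [List.dropWhile, PySem.Int.isIntSpace]
  | cons c t ih =>
    by_cases h : PySem.Int.isIntSpace c <;> simp [List.dropWhile, h, ih]

-- int("$…") always raises ValueError, so a merged token is never merged into again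
lemma dollar_not_int (x : String) : PySem.Int.ofStr? ("$" ++ x) = none := by
  simp only [PySem.Int.ofStr?, String.toList_append]
  show PySem.Int.ofChars? ('$' :: x.toList) = none
  rw [PySem.Int.ofChars?]
  have h1 : List.dropWhile PySem.Int.isIntSpace ('$' :: x.toList) = '$' :: x.toList := by
    simp [List.dropWhile, PySem.Int.isIntSpace]
  rw [h1]
  rw [show ('$' :: x.toList).reverse = x.toList.reverse ++ ['$'] by simp]
  rw [dropWhile_append_dollar]
  rw [List.reverse_append]
  rfl

lemma dA_val {y k : String} (h : PySem.Dict.get? dA y = some k) : k = "$" := by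
  rw [dA_mk] at h
  simp only [PySem.Dict.get?_mk_cons] at h
  split_ifs at h with h1 h2
  · simpa using h.symm
  · simpa using h.symm
  · simp [PySem.Dict.get?] at h

lemma int_not_key {x : String} (h : is_int x = true) : PySem.Dict.get? dA x = none := by
  rcases hk : PySem.Dict.get? dA x with _ | k
  · rfl
  · rw [key_not_int hk] at h; cases h

lemma pySetD_neg_one_app (a : List String) (z v : String) :
    PySem.List.pySetD (a ++ [z]) (-1) v = a ++ [v] := by
  simp [PySem.List.pySetD, PySem.List.pySet?, PySem.List.pyIdx?]

-- only needed when the next token is a currency word: the last output token is not int-like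
def Safe (l out : List String) : Prop :=
  (∀ y, l.head? = some y → (PySem.Dict.get? dA y).isSome →
    out = [] ∨ is_int (PySem.List.pyGetD out (-1) "") = false)

lemma stepB_append {out : List String} {x : String}
    (hs : Safe (x :: []) out ∨ PySem.Dict.get? dA x = none) :
    stepB out x = out ++ [x] := by
  unfold stepB
  rcases hk : PySem.Dict.get? dB x with _ | k
  · rfl
  · have hkA : PySem.Dict.get? dA x = some k := hk
    rcases hs with hs | hn
    · rcases hs x rfl (by rw [hkA]; rfl) with h | h
      · simp [h]
      · have hb : is_int_b (PySem.List.pyGetD out (-1) "") = false := h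
        simp [hb]
    · rw [hn] at hkA; cases hkA
  
-- Source B's fold agrees with the two-at-a-time recursion
lemma foldB : ∀ (l : List String), ∀ out : List String, Safe l out →
    List.foldl stepB out l = out ++ alt2 l := by
  intro l
  induction l using alt2.induct with
  | case1 => intro out _; simp [alt2]
  | case2 x =>
    intro out hs
    rw [List.foldl_cons, List.foldl_nil, stepB_append (Or.inl hs)]
    simp [alt2]
  | case3 x y rest hint k hk ih =>
    intro out hs
    rw [List.foldl_cons, stepB_append (Or.inr (int_not_key hint))]
    rw [List.foldl_cons]
    have hlast : PySem.List.pyGetD (out ++ [x]) (-1) "" = x :=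
      PySem.List.pyGetD_neg_one_append_singleton out x ""
    have hstep : stepB (out ++ [x]) y = out ++ [k ++ x] := by
      unfold stepB
      have hkB : PySem.Dict.get? dB y = some k := hk
      simp only [hkB, hlast]
      rw [if_pos ⟨by simp, hint⟩, pySetD_neg_one_app]
    have hsafe : Safe rest (out ++ [k ++ x]) := by
      intro z _ _
      right
      rw [PySem.List.pyGetD_neg_one_append_singleton]
      rw [dA_val hk]
      simp [is_int, dollar_not_int]
    rw [hstep, ih (out ++ [k ++ x]) hsafe]
    simp [alt2, hint, hk]
  | case4 x y rest hint hk ih =>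
    intro out hs
    have hsafe : Safe (y :: rest) (out ++ [x]) := by
      intro z hz hzk
      have hzy : y = z := by simpa using hz
      subst hzy
      rw [hk] at hzk; cases hzk
    rw [List.foldl_cons, stepB_append (Or.inr (int_not_key hint))]
    rw [ih (out ++ [x]) hsafe]
    simp [alt2, hint, hk]
  | case5 x y rest hint ih =>
    intro out hs
    have hintA : is_int x = false := by simpa using hint
    have hhead : Safe [x] out := by
      intro z hz hk
      have hzx : x = z := by simpa using hz
      subst hzx
      exact hs x rfl hk
    have hsafe : Safe (y :: rest) (out ++ [x]) := by
      intro z _ _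
      right
      rw [PySem.List.pyGetD_neg_one_append_singleton]
      exact hintA
    rw [List.foldl_cons, stepB_append (Or.inl hhead)]
    rw [ih (out ++ [x]) hsafe]
    simp [alt2, hintA]

-- ===== VERDICT (by name: the statement is the Claim_ definition above) =====
theorem currency_signs_spec : Claim_equal_currency_signs := by
  intro l _
  show currency_signs l = currency_signs_alt l
  have h0 := loopA l [] []
  simp only [List.length_nil, Int.natCast_zero, List.nil_append, zero_add] at h0
  have h1 := remLemma l [] 0 le_rfl
  simp only [List.length_nil, Int.natCast_zero, List.nil_append, zero_add] at h1
  have h2 : currency_signs l = alt2 l := by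
    unfold currency_signs
    rw [h0]
    exact h1
  have h3 : currency_signs_alt l = alt2 l := by
    unfold currency_signs_alt
    rw [foldB l [] (fun z _ _ => Or.inl rfl)]
    simp
  rw [h2, h3]
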